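-- pv_equiv track=rewrite | github.com/Neoathenian/Scraping_amazon | src/Remove_accents.py | divide_string_into_words
-- ===== SOURCE A (Python) =====
-- def divide_string_into_words(dictionary, string):
--     # Check if the string is directly in the dictionary
--     if string in dictionary:
--         return [string]
--
--     word_set = set(dictionary)
--     memo = {}
--
--     def can_break(s, last_word_length=None):
--         if (s, last_word_length) in memo:
--             return memo[(s, last_word_length)]
--         if not s:
--             # Empty string, return empty list
--             return []
--
--         best_result = None
--         for i in range(len(s), 0, -1):  # Try longer prefixes first
--             prefix = s[:i]
--             if prefix in word_set:
--                 current_word_length = len(prefix)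
--                 if last_word_length == 1 and current_word_length == 1:
--                     # Skip if last word and current word are both length 1
--                     continue
--                 suffix = s[i:]
--                 suffix_result = can_break(suffix, current_word_length)
--                 if suffix_result is not None:
--                     candidate = [prefix] + suffix_result
--                     if best_result is None:
--                         best_result = candidate
--                     else:
--                         # Choose the candidate that maximizes the minimal word length
--                         min_length_candidate = min(len(word) for word in candidate)
--                         min_length_best = min(len(word) for word in best_result)
--                         if min_length_candidate > min_length_best:
--                             best_result = candidate
--                         elif min_length_candidate == min_length_best:
--                             if len(candidate) < len(best_result):
--                                 best_result = candidate
--         memo[(s, last_word_length)] = best_result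
--         return best_result
--
--     result = can_break(string)
--     return result if result is not None else [string]
-- ===== SOURCE B (Python) =====
-- def divide_string_into_words(dictionary, string):
--     # Bottom-up index DP (instead of A's top-down memoized recursion on suffix
--     # strings): for each start position j and a boolean flag b ("previous word
--     # had length 1"), store the best split of string[j:] as (minlen, count, words).
--     if string in dictionary:
--         return [string]
--
--     word_set = set(dictionary)
--     n = len(string)
--     # rows[k] corresponds to start position j+1+k while building row j;
--     # each row is (entry for flag False, entry for flag True),
--     # an entry is None or (min word length, word count, list of words).
--     rows = [((0, 0, []), (0, 0, []))]
--     for j in range(n - 1, -1, -1):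
--         row = (_best_from(word_set, string, n, j, False, rows),
--                _best_from(word_set, string, n, j, True, rows))
--         rows = [row] + rows
--
--     entry = rows[0][0]
--     return entry[2] if entry is not None else [string]
--
--
-- def _best_from(word_set, string, n, j, b, rows):
--     res = None
--     for i in range(n, j, -1):
--         w = string[j:i]
--         L = i - j
--         if w in word_set and not (b and L == 1):
--             sub = rows[i - j - 1][1 if L == 1 else 0]
--             if sub is None:
--                 continue
--             sm, sc, sl = sub
--             cm = L if sc == 0 else min(L, sm)
--             cc = sc + 1
--             if res is None or cm > res[0] or (cm == res[0] and cc < res[1]):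
--                 res = (cm, cc, [w] + sl)
--     return res
-- ===== Notes on version B (the rewrite author's own statement) =====
-- stated objective: alternative
-- what changed: Replaced A's top-down recursion memoized on (suffix-string, last-word-length) pairs by a bottom-up index DP over start positions with a boolean last-word-length-1 flag, storing (min word length, word count) metrics with each entry instead of recomputing min over whole candidate lists at every comparison.
import Mathlib
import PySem

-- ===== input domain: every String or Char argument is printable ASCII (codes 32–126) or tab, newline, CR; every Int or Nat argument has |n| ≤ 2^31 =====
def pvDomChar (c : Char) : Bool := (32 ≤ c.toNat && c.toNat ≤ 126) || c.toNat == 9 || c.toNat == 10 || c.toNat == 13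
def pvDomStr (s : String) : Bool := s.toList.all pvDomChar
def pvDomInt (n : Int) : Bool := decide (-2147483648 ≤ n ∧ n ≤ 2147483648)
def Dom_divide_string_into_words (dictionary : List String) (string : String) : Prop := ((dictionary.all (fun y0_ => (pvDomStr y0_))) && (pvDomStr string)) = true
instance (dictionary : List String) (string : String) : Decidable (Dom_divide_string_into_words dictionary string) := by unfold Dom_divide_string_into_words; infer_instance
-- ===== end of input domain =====

-- B replaces A's top-down memoized recursion on suffix strings by a bottom-up index
-- DP storing (min word length, word count, words) per position (a different algorithm).

-- ===== PORT A =====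
-- A's `min(len(word) for word in lst)` (only used on nonempty lists)
def pvMinLen : List String → Int
  | [] => 0
  | w :: r => r.foldl (fun m x => min m (x.length : Int)) (w.length : Int)

-- `range(len(s), 0, -1)` as Nat indices [n, n-1, …, 1]
def pvDown (n : Nat) : List Nat := (List.range n).map (fun k => n - k)

-- A's `can_break`, with the memo dropped (it only caches values, it never changes
-- them: each (suffix, last) state recomputes the same result); fuel makes the
-- recursion on strictly shorter suffixes structural (never exhausted when
-- fuel > s.length). `none` is Python's None.
def pvCanBreak (ws : List String) : Nat → List Char → Option Int → Option (List String)
  | 0, _, _ => none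
  | f + 1, s, last =>
    if s.isEmpty then some [] else
      (pvDown s.length).foldl (fun best i =>
        let pre := String.ofList (s.take i)
        if ws.contains pre then
          if last = some 1 ∧ (i : Int) = 1 then best
          else
            match pvCanBreak ws f (s.drop i) (some (i : Int)) with
            | none => best
            | some sub =>
              let cand := pre :: sub
              match best with
              | none => some cand
              | some b =>
                if pvMinLen cand > pvMinLen b then some cand
                else if pvMinLen cand = pvMinLen b ∧ cand.length < b.length then some cand
                else best
        else best) none

def divide_string_into_words (dictionary : List String) (string : String) : List String :=
  if dictionary.contains string then [string]
  else
    let wordSet := PySem.Set.ofList dictionary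
    match pvCanBreak wordSet (string.toList.length + 1) string.toList none with
    | some r => r
    | none => [string]

-- ===== PORT B =====
-- B's `_best_from`: best (minlen, count, words) split of string[j:] under flag b,
-- reading sub-results from `rows` (rows.getD k = row for start position j+1+k;
-- the getD default is a totality guard, the index is always in range).
-- string[j:i] is (s.drop j).take (i-j): exact for these in-range indices.
def pvBestFrom (ws : List String) (s : List Char) (n j : Nat) (b : Bool)
    (rows : List (Option (Int × Int × List String) × Option (Int × Int × List String))) :
    Option (Int × Int × List String) :=
  ((List.range (n - j)).map (fun k => n - k)).foldl (fun res i =>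
    let w := String.ofList ((s.drop j).take (i - j))
    let L : Int := (i : Int) - (j : Int)
    if ws.contains w ∧ ¬(b ∧ L = 1) then
      match (if L = 1 then (rows.getD (i - j - 1) (none, none)).2
             else (rows.getD (i - j - 1) (none, none)).1) with
      | none => res
      | some (sm, sc, sl) =>
        let cm := if sc = 0 then L else min L sm
        let cc := sc + 1
        match res with
        | none => some (cm, cc, w :: sl)
        | some (rm, rc, _) =>
          if cm > rm ∨ (cm = rm ∧ cc < rc) then some (cm, cc, w :: sl) else res
    else res) none

-- B's main loop `rows = [row] + rows` for j = n-1 … 0, seeded with the row for j = n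
def pvRows (ws : List String) (s : List Char) (n : Nat) :
    Nat → List (Option (Int × Int × List String) × Option (Int × Int × List String))
  | 0 => [(some (0, 0, []), some (0, 0, []))]
  | t + 1 =>
    let rows := pvRows ws s n t
    (pvBestFrom ws s n (n - (t + 1)) false rows, pvBestFrom ws s n (n - (t + 1)) true rows) :: rows

def divide_string_into_words_alt (dictionary : List String) (string : String) : List String :=
  if dictionary.contains string then [string]
  else
    let s := string.toList
    let n := s.length
    let wordSet := PySem.Set.ofList dictionary
    let rows := pvRows wordSet s n n
    match (rows.getD 0 (none, none)).1 with
    | some (_, _, l) => l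
    | none => [string]

-- ===== PRECONDITION & SPEC =====
def Spec_divide_string_into_words (dictionary : List String) (string : String) (out : List String) : Prop := out = divide_string_into_words_alt dictionary string
instance (dictionary : List String) (string : String) (out : List String) : Decidable (Spec_divide_string_into_words dictionary string out) := by unfold Spec_divide_string_into_words; infer_instance

-- ===== CLAIM (what is proved, stated in full; the proofs are below) =====
def Claim_equal_divide_string_into_words : Prop := ∀ (dictionary : List String) (string : String), Dom_divide_string_into_words dictionary string → Spec_divide_string_into_words dictionary string (divide_string_into_words dictionary string)

-- ===== LEMMAS AND PROOFS =====

-- membership in the descending index list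
theorem mem_pvDown {n i : Nat} (h : i ∈ pvDown n) : 1 ≤ i ∧ i ≤ n := by
  unfold pvDown at h
  simp only [List.mem_map, List.mem_range] at h
  obtain ⟨k, hk, rfl⟩ := h
  omega

-- fuel irrelevance: any fuel > s.length gives the same value
theorem pvCanBreak_fuel (ws : List String) :
    ∀ f₁ f₂ s last, s.length < f₁ → s.length < f₂ →
      pvCanBreak ws f₁ s last = pvCanBreak ws f₂ s last := by
  intro f₁
  induction f₁ with
  | zero => intro f₂ s last h1 h2; omega
  | succ a ih =>
    intro f₂ s last h1 h2
    cases f₂ with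
    | zero => omega
    | succ c =>
      rw [pvCanBreak, pvCanBreak]
      by_cases hs : s.isEmpty
      · simp [hs]
      · simp only [hs, Bool.false_eq_true, if_false]
        refine PySem.List.foldl_congr_mem _ _ _ none (fun best i hi => ?_)
        obtain ⟨hi1, hi2⟩ := mem_pvDown hi
        have hlen : (s.drop i).length = s.length - i := by simp
        have hne : 1 ≤ s.length := by
          cases s with
          | nil => simp at hs
          | cons x xs => simp
        have hrec : pvCanBreak ws a (s.drop i) (some (i : Int)) = pvCanBreak ws c (s.drop i) (some (i : Int)) := by
          apply ih <;> omega
        simp only [hrec]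

-- the value depends on `last` only through `last = some 1`
theorem pvCanBreak_last (ws : List String) :
    ∀ f s l₁ l₂, (l₁ = some 1 ↔ l₂ = some 1) →
      pvCanBreak ws f s l₁ = pvCanBreak ws f s l₂ := by
  intro f
  induction f with
  | zero => intro s l₁ l₂ h; rfl
  | succ a ih =>
    intro s l₁ l₂ h
    rw [pvCanBreak, pvCanBreak]
    by_cases hs : s.isEmpty
    · simp [hs]
    · simp only [hs, Bool.false_eq_true, if_false]
      refine PySem.List.foldl_congr_mem _ _ _ none (fun best i hi => ?_)
      simp only [h]

-- canonical form: A's can_break at its own suffix, with the boolean state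
def pvCB (ws : List String) (s : List Char) (b : Bool) : Option (List String) :=
  pvCanBreak ws (s.length + 1) s (if b then some 1 else none)

-- B's stored metrics attached to a result list
def pvEnc (o : Option (List String)) : Option (Int × Int × List String) :=
  o.map (fun l => (pvMinLen l, (l.length : Int), l))

theorem pvFoldMin (r : List String) : ∀ a b : Int,
    r.foldl (fun m x => min m (x.length : Int)) (min a b) =
      min a (r.foldl (fun m x => min m (x.length : Int)) b) := by
  induction r with
  | nil => intro a b; rfl
  | cons y ys ih =>
    intro a b
    simp only [List.foldl_cons, min_assoc, ih]

theorem pvMinLen_cons (w : String) (sl : List String) :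
    pvMinLen (w :: sl) = if sl.isEmpty then (w.length : Int) else min (w.length : Int) (pvMinLen sl) := by
  cases sl with
  | nil => simp [pvMinLen]
  | cons x r => simp [pvMinLen, pvFoldMin]

-- the row invariant
def pvRowOK (ws : List String) (s : List Char)
    (rows : List (Option (Int × Int × List String) × Option (Int × Int × List String)))
    (t : Nat) : Prop :=
  ∀ k, k ≤ t → rows.getD k (none, none) =
    (pvEnc (pvCB ws (s.drop (s.length - t + k)) false), pvEnc (pvCB ws (s.drop (s.length - t + k)) true))

-- A's loop body as a named function (definitionally the lambda inside pvCanBreak)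
def pvStepA (ws : List String) (f : Nat) (s : List Char) (last : Option Int)
    (best : Option (List String)) (i : Nat) : Option (List String) :=
  let pre := String.ofList (s.take i)
  if ws.contains pre then
    if last = some 1 ∧ (i : Int) = 1 then best
    else
      match pvCanBreak ws f (s.drop i) (some (i : Int)) with
      | none => best
      | some sub =>
        let cand := pre :: sub
        match best with
        | none => some cand
        | some b =>
          if pvMinLen cand > pvMinLen b then some cand
          else if pvMinLen cand = pvMinLen b ∧ cand.length < b.length then some cand
          else best
  else best

theorem pvCanBreak_succ (ws : List String) (f : Nat) (s : List Char) (last : Option Int) :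
    pvCanBreak ws (f + 1) s last =
      if s.isEmpty then some [] else (pvDown s.length).foldl (pvStepA ws f s last) none := rfl

-- B's loop body as a named function (definitionally the lambda inside pvBestFrom)
def pvStepB (ws : List String) (s : List Char) (n j : Nat) (b : Bool)
    (rows : List (Option (Int × Int × List String) × Option (Int × Int × List String)))
    (res : Option (Int × Int × List String)) (i : Nat) : Option (Int × Int × List String) :=
  let w := String.ofList ((s.drop j).take (i - j))
  let L : Int := (i : Int) - (j : Int)
  if ws.contains w ∧ ¬(b ∧ L = 1) then
    match (if L = 1 then (rows.getD (i - j - 1) (none, none)).2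
           else (rows.getD (i - j - 1) (none, none)).1) with
    | none => res
    | some (sm, sc, sl) =>
      let cm := if sc = 0 then L else min L sm
      let cc := sc + 1
      match res with
      | none => some (cm, cc, w :: sl)
      | some (rm, rc, _) =>
        if cm > rm ∨ (cm = rm ∧ cc < rc) then some (cm, cc, w :: sl) else res
  else res

theorem pvBestFrom_def (ws : List String) (s : List Char) (n j : Nat) (b : Bool)
    (rows : List (Option (Int × Int × List String) × Option (Int × Int × List String))) :
    pvBestFrom ws s n j b rows =
      ((List.range (n - j)).map (fun k => n - k)).foldl (pvStepB ws s n j b rows) none := rfl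

-- B's table lookup returns (the encoding of) A's recursive call
theorem pvLookup_eq (ws : List String) (s : List Char) (t : Nat)
    (rows : List (Option (Int × Int × List String) × Option (Int × Int × List String)))
    (ht : t + 1 ≤ s.length) (hrows : pvRowOK ws s rows t)
    (i : Nat) (h1 : 1 ≤ i) (h2 : i ≤ t + 1) :
    (if ((i : Int)) = 1 then (rows.getD (i - 1) (none, none)).2
     else (rows.getD (i - 1) (none, none)).1)
      = pvEnc (pvCanBreak ws (t + 1) ((s.drop (s.length - (t + 1))).drop i) (some (i : Int))) := by
  have hdd : (s.drop (s.length - (t + 1))).drop i = s.drop (s.length - t + (i - 1)) := by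
    rw [List.drop_drop]; congr 1; omega
  have hlt : (s.drop (s.length - t + (i - 1))).length < t + 1 := by simp; omega
  rw [hdd, pvCanBreak_fuel ws (t + 1) ((s.drop (s.length - t + (i - 1))).length + 1) _ _ hlt
    (by omega)]
  have hr := hrows (i - 1) (by omega)
  by_cases hone : i = 1
  · subst hone
    rw [if_pos (by norm_num), hr]
    show pvEnc (pvCB ws (s.drop (s.length - t + (1 - 1))) true) = _
    unfold pvCB
    exact congrArg _ (pvCanBreak_last ws _ _ _ _ (by simp))
  · rw [if_neg (by exact_mod_cast hone), hr]
    show pvEnc (pvCB ws (s.drop (s.length - t + (i - 1))) false) = _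
    unfold pvCB
    refine congrArg _ (pvCanBreak_last ws _ _ _ _ ?_)
    simp only [Option.some.injEq]
    constructor
    · intro h; simp at h
    · intro h; exfalso; apply hone; omega

-- B's stored-metrics comparison picks the same candidate as A's recomputed comparison
theorem pvCombine (w : String) (sl : List String) (acc : Option (List String)) :
    (match Option.map (fun l => (pvMinLen l, (l.length : Int), l)) acc with
     | none => some (pvMinLen (w :: sl), ((w :: sl).length : Int), w :: sl)
     | some (rm, rc, _) =>
       if pvMinLen (w :: sl) > rm ∨ (pvMinLen (w :: sl) = rm ∧ ((w :: sl).length : Int) < rc)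
       then some (pvMinLen (w :: sl), ((w :: sl).length : Int), w :: sl)
       else Option.map (fun l => (pvMinLen l, (l.length : Int), l)) acc)
    = Option.map (fun l => (pvMinLen l, (l.length : Int), l))
      (match acc with
       | none => some (w :: sl)
       | some b =>
         if pvMinLen (w :: sl) > pvMinLen b then some (w :: sl)
         else if pvMinLen (w :: sl) = pvMinLen b ∧ (w :: sl).length < b.length then some (w :: sl)
         else acc) := by
  cases acc with
  | none => rfl
  | some bl =>
    simp only [Option.map_some]
    by_cases hgt : pvMinLen (w :: sl) > pvMinLen bl
    · rw [if_pos (Or.inl hgt), if_pos hgt]; rfl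
    · by_cases heq : pvMinLen (w :: sl) = pvMinLen bl ∧ (w :: sl).length < bl.length
      · rw [if_pos (Or.inr ⟨heq.1, by exact_mod_cast heq.2⟩), if_neg hgt, if_pos heq]; rfl
      · rw [if_neg ?_, if_neg hgt, if_neg heq]
        · rfl
        · rintro (h | ⟨hh1, hh2⟩)
          · exact hgt h
          · exact heq ⟨hh1, by exact_mod_cast hh2⟩

-- one loop iteration of B computes (the encoding of) one loop iteration of A
theorem pvStep_eq (ws : List String) (s : List Char) (t : Nat) (b : Bool)
    (rows : List (Option (Int × Int × List String) × Option (Int × Int × List String)))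
    (ht : t + 1 ≤ s.length) (hrows : pvRowOK ws s rows t)
    (i : Nat) (h1 : 1 ≤ i) (h2 : i ≤ t + 1) (acc : Option (List String)) :
    pvStepB ws s s.length (s.length - (t + 1)) b rows (pvEnc acc) (i + (s.length - (t + 1))) =
      pvEnc (pvStepA ws (t + 1) (s.drop (s.length - (t + 1))) (if b then some 1 else none) acc i) := by
  have hm1 : i + (s.length - (t + 1)) - (s.length - (t + 1)) = i := by omega
  have hm2 : ((i + (s.length - (t + 1)) : Nat) : Int) - ((s.length - (t + 1) : Nat) : Int)
      = (i : Int) := by push_cast; ring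
  have hpre : (String.ofList ((s.drop (s.length - (t + 1))).take i)).length = i := by
    simp; omega
  simp only [pvStepA, pvStepB, hm1, hm2]
  rw [pvLookup_eq ws s t rows ht hrows i h1 h2]
  by_cases hc : ws.contains (String.ofList ((s.drop (s.length - (t + 1))).take i)) = true
  case neg =>
    have hmem : ¬(String.ofList ((s.drop (s.length - (t + 1))).take i) ∈ ws) := by
      simpa using hc
    simp [hmem]
  case pos =>
    have hmem : String.ofList ((s.drop (s.length - (t + 1))).take i) ∈ ws := by
      simpa using hc
    cases hsub : pvCanBreak ws (t + 1) ((s.drop (s.length - (t + 1))).drop i)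
        (some (i : Int)) with
    | none =>
      cases b <;> by_cases hone : i = 1 <;> simp [hmem, hone, pvEnc]
    | some sl =>
      have hcm : (if ((sl.length : Int)) = 0 then (i : Int) else min (i : Int) (pvMinLen sl))
          = pvMinLen (String.ofList ((s.drop (s.length - (t + 1))).take i) :: sl) := by
        rw [pvMinLen_cons, hpre]
        cases sl with
        | nil => simp
        | cons x r =>
          rw [if_neg (by simp only [List.length_cons]; push_cast; omega), if_neg (by simp)]
      have hcc : ((sl.length : Int)) + 1
          = (((String.ofList ((s.drop (s.length - (t + 1))).take i) :: sl).length : Int)) := by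
        simp only [List.length_cons]; push_cast; ring
      cases b
      · simp only [hc, Bool.false_eq_true, false_and, not_false_iff, and_true, if_true,
          reduceCtorEq, if_false, pvEnc, Option.map_some]
        rw [hcm, hcc]
        exact pvCombine _ sl acc
      · by_cases hone : i = 1
        · simp [hmem, hone, pvEnc]
        · have hone' : ¬((i : Int)) = 1 := by omega
          simp only [hc, hone', eq_self_iff_true, true_and, and_false, not_false_iff,
            and_true, if_true, if_false, pvEnc, Option.map_some]
          rw [hcm, hcc]
          exact pvCombine _ sl acc

-- B's inner loop computes (the encoding of) A's loop over the same suffix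
theorem pvBestFrom_eq (ws : List String) (s : List Char) (t : Nat) (b : Bool)
    (rows : List (Option (Int × Int × List String) × Option (Int × Int × List String)))
    (ht : t + 1 ≤ s.length) (hrows : pvRowOK ws s rows t) :
    pvBestFrom ws s s.length (s.length - (t + 1)) b rows =
      pvEnc (pvCB ws (s.drop (s.length - (t + 1))) b) := by
  have hnm : s.length - (s.length - (t + 1)) = t + 1 := by omega
  have hlen : (s.drop (s.length - (t + 1))).length = t + 1 := by simp; omega
  have hmap : (List.range (t + 1)).map (fun k => s.length - k) =
      (pvDown (t + 1)).map (fun i => i + (s.length - (t + 1))) := by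
    unfold pvDown
    rw [List.map_map]
    refine List.map_congr_left (fun k hk => ?_)
    simp only [List.mem_range] at hk
    simp only [Function.comp_apply]
    omega
  have hfold : ∀ (l : List Nat), (∀ i ∈ l, 1 ≤ i ∧ i ≤ t + 1) → ∀ acc,
      l.foldl (fun a i => pvStepB ws s s.length (s.length - (t + 1)) b rows a
        (i + (s.length - (t + 1)))) (pvEnc acc) =
      pvEnc (l.foldl (pvStepA ws (t + 1) (s.drop (s.length - (t + 1)))
        (if b then some 1 else none)) acc) := by
    intro l
    induction l with
    | nil => intro _ acc; rfl
    | cons x xs ih =>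
      intro h acc
      simp only [List.foldl_cons]
      rw [pvStep_eq ws s t b rows ht hrows x (h x (by simp)).1 (h x (by simp)).2 acc]
      exact ih (fun i hi => h i (List.mem_cons_of_mem _ hi)) _
  rw [pvBestFrom_def, hnm, hmap, List.foldl_map]
  have := hfold (pvDown (t + 1)) (fun i hi => mem_pvDown hi) none
  rw [show (pvEnc none : Option (Int × Int × List String)) = none from rfl] at this
  rw [this]
  unfold pvCB
  rw [hlen, pvCanBreak_succ]
  have hne : (s.drop (s.length - (t + 1))).isEmpty = false := by
    rw [List.isEmpty_eq_false_iff_exists_mem]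
    rcases List.exists_mem_of_length_pos (by omega : 0 < (s.drop (s.length - (t + 1))).length) with ⟨a, ha⟩
    exact ⟨a, ha⟩
  rw [hne, hlen]
  simp

theorem pvRows_ok (ws : List String) (s : List Char) :
    ∀ t, t ≤ s.length → pvRowOK ws s (pvRows ws s s.length t) t := by
  intro t
  induction t with
  | zero =>
    intro _ k hk
    interval_cases k
    have hdrop : s.drop (s.length - 0 + 0) = [] := by
      rw [show s.length - 0 + 0 = s.length from by omega, List.drop_length]
    simp only [pvRows, List.getD, hdrop]
    have hcb : ∀ b : Bool, pvCB ws [] b = some [] := by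
      intro b; unfold pvCB; rw [pvCanBreak_succ]; rfl
    simp [hcb, pvEnc, pvMinLen]
  | succ t ih =>
    intro ht k hk
    have hrows := ih (by omega)
    cases k with
    | zero =>
      simp only [pvRows, List.getD_cons_zero]
      rw [show s.length - (t + 1) + 0 = s.length - (t + 1) from by omega]
      rw [pvBestFrom_eq ws s t false (pvRows ws s s.length t) ht hrows,
          pvBestFrom_eq ws s t true (pvRows ws s s.length t) ht hrows]
    | succ k =>
      simp only [pvRows, List.getD_cons_succ]
      rw [hrows k (by omega)]
      rw [show s.length - t + k = s.length - (t + 1) + (k + 1) from by omega]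

-- ===== VERDICT (by name: the statement is the Claim_ definition above) =====
theorem divide_string_into_words_spec : Claim_equal_divide_string_into_words := by
  intro dictionary string _
  unfold Spec_divide_string_into_words divide_string_into_words divide_string_into_words_alt
  by_cases hd : dictionary.contains string = true
  · rw [if_pos hd, if_pos hd]
  · rw [if_neg hd, if_neg hd]
    have h0 := pvRows_ok (PySem.Set.ofList dictionary) string.toList string.toList.length
      (le_refl _) 0 (Nat.zero_le _)
    rw [show string.toList.length - string.toList.length + 0 = 0 from by omega,
        List.drop_zero] at h0
    dsimp only
    rw [h0]
    simp only [pvCB, pvEnc, Bool.false_eq_true, if_false]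
    cases hres : pvCanBreak (PySem.Set.ofList dictionary) (string.toList.length + 1)
        string.toList none with
    | none => simp [hres]
    | some r => simp [hres]
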